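-- pv_equiv track=rewrite | github.com/xthxr/OpenSauce | Python/backtracking/rat_in_maze.py | find_path_with_coordinates
-- ===== SOURCE A (Python) =====
-- def find_path_with_coordinates(maze, n):
--     """
--     Returns paths with coordinate representation
--     """
--
--     def dfs(x, y, path, coords, visited):
--         if x == n - 1 and y == n - 1:
--             result.append((path, coords[:]))
--             return
--
--         directions = ['D', 'L', 'R', 'U']
--         dx = [1, 0, 0, -1]
--         dy = [0, -1, 1, 0]
--
--         for i in range(4):
--             nx, ny = x + dx[i], y + dy[i]
--
--             if (0 <= nx < n and 0 <= ny < n and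
--                 maze[nx][ny] == 1 and not visited[nx][ny]):
--                 visited[nx][ny] = True
--                 coords.append((nx, ny))
--
--                 dfs(nx, ny, path + directions[i], coords, visited)
--
--                 coords.pop()
--                 visited[nx][ny] = False
--
--     result = []
--
--     if not maze or maze[0][0] == 0 or maze[n - 1][n - 1] == 0:
--         return []
--
--     visited = [[False] * n for _ in range(n)]
--     visited[0][0] = True
--
--     dfs(0, 0, "", [(0, 0)], visited)
--
--     return result
-- ===== SOURCE B (Python) =====
-- def find_path_with_coordinates(maze, n):
--     """
--     Returns paths with coordinate representation
--     (iterative DFS with an explicit stack; a cell counts as visited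
--     iff it lies on the current path's coordinate list)
--     """
--     if not maze or maze[0][0] == 0 or maze[n - 1][n - 1] == 0:
--         return []
--
--     result = []
--     stack = [(0, 0, "", [(0, 0)])]
--
--     while stack:
--         x, y, path, coords = stack.pop()
--
--         if x == n - 1 and y == n - 1:
--             result.append((path, coords))
--             continue
--
--         # push in reverse of the D,L,R,U exploration order (LIFO stack)
--         for d, nx, ny in (("U", x - 1, y), ("R", x, y + 1), ("L", x, y - 1), ("D", x + 1, y)):
--             if 0 <= nx < n and 0 <= ny < n and maze[nx][ny] == 1 and (nx, ny) not in coords: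
--                 stack.append((nx, ny, path + d, coords + [(nx, ny)]))
--
--     return result
-- ===== Notes on version B (the rewrite author's own statement) =====
-- stated objective: alternative
-- what changed: The recursive backtracking with a mutable n-by-n visited matrix is replaced by an iterative DFS over an explicit stack of immutable (x, y, path, coords) frames, where 'visited' is simply membership in the frame's own coordinate list; neighbours are pushed in reverse (U,R,L,D) order so the LIFO pop reproduces A's D,L,R,U preorder exactly.
-- outside the precondition, e.g. on find_path_with_coordinates([[1, 0, 1], [0], [0, 0, 1]], 3): A returns [], B returns []
import Mathlib
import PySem

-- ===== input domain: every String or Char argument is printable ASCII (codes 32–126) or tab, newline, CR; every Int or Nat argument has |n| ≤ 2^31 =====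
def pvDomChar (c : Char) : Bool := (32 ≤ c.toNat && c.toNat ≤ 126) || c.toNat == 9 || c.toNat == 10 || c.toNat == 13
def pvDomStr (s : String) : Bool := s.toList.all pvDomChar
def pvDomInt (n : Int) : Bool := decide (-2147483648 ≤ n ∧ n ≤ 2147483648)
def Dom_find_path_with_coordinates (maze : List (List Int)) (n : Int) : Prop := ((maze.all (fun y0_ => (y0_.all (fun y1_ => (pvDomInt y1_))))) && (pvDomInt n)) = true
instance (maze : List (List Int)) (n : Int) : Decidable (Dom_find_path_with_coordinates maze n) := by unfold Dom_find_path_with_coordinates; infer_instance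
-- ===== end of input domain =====

-- B replaces A's recursive backtracking over a mutable visited matrix by an iterative DFS with an
-- explicit stack of immutable frames, 'visited' being membership in the frame's coordinate list
-- (objective: alternative; same asymptotic cost).

-- ===== PORT A =====
-- maze[i][j]: Python indexing (negative wraparound) via pyGet?; the .getD 0 default is never the
-- value used on inputs inside Pre_ (there the indices that get read are valid).
def pvAt (maze : List (List Int)) (i j : Int) : Int :=
  ((PySem.List.pyGet? maze i).bind (fun r => PySem.List.pyGet? r j)).getD 0

def pvGetV (v : List (List Bool)) (i j : Int) : Bool := (v.getD i.toNat []).getD j.toNat false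
def pvSetV (v : List (List Bool)) (i j : Int) (b : Bool) : List (List Bool) :=
  v.set i.toNat ((v.getD i.toNat []).set j.toNat b)

-- directions D, L, R, U with their (dx, dy), in A's loop order
def pvDirs : List (Char × Int × Int) := [('D', 1, 0), ('L', 0, -1), ('R', 0, 1), ('U', -1, 0)]

-- A's dfs: the visited matrix is mutated then restored around each recursive call, so it is passed
-- down functionally; `fuel` is only a totality guard (recursion depth is |coords| growth ≤ n²,
-- so the initial fuel n² below is never exhausted on inputs inside Pre_).
def pvDfsA (maze : List (List Int)) (n : Int) (fuel : Nat) (x y : Int) (path : String)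
    (coords : List (Int × Int)) (visited : List (List Bool)) : List (String × List (Int × Int)) :=
  match fuel with
  | 0 => []
  | fuel + 1 =>
    if x = n - 1 ∧ y = n - 1 then [(path, coords)]
    else
      pvDirs.foldl (fun acc d =>
        let nx := x + d.2.1
        let ny := y + d.2.2
        if 0 ≤ nx ∧ nx < n ∧ 0 ≤ ny ∧ ny < n ∧ pvAt maze nx ny = 1 ∧ pvGetV visited nx ny = false then
          acc ++ pvDfsA maze n fuel nx ny (path.push d.1) (coords ++ [(nx, ny)])
                  (pvSetV visited nx ny true)
        else acc) []

def find_path_with_coordinates (maze : List (List Int)) (n : Int) : List (String × (List (Int × Int))) :=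
  if maze = [] ∨ pvAt maze 0 0 = 0 ∨ pvAt maze (n - 1) (n - 1) = 0 then []
  else
    pvDfsA maze n (n.toNat * n.toNat) 0 0 "" [(0, 0)]
      (pvSetV (List.replicate n.toNat (List.replicate n.toNat false)) 0 0 true)

-- ===== PORT B =====
-- B's candidate neighbours in its push order U, R, L, D
def pvCands (x y : Int) : List (Char × Int × Int) :=
  [('U', x - 1, y), ('R', x, y + 1), ('L', x, y - 1), ('D', x + 1, y)]

-- stack head = top (Python's list end); push = cons.  `fuel` is only a totality guard: the initial
-- fuel 5 ^ n² below dominates the number of loop iterations on inputs inside Pre_.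
def pvLoopB (maze : List (List Int)) (n : Int) (fuel : Nat)
    (stack : List (Int × Int × String × List (Int × Int)))
    (result : List (String × List (Int × Int))) : List (String × List (Int × Int)) :=
  match fuel with
  | 0 => result
  | fuel + 1 =>
    match stack with
    | [] => result
    | (x, y, path, coords) :: rest =>
      if x = n - 1 ∧ y = n - 1 then
        pvLoopB maze n fuel rest (result ++ [(path, coords)])
      else
        pvLoopB maze n fuel
          ((pvCands x y).foldl (fun st d =>
            let nx := d.2.1
            let ny := d.2.2
            if 0 ≤ nx ∧ nx < n ∧ 0 ≤ ny ∧ ny < n ∧ pvAt maze nx ny = 1 ∧ (nx, ny) ∉ coords then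
              (nx, ny, path.push d.1, coords ++ [(nx, ny)]) :: st
            else st) rest)
          result

def find_path_with_coordinates_alt (maze : List (List Int)) (n : Int) : List (String × (List (Int × Int))) :=
  if maze = [] ∨ pvAt maze 0 0 = 0 ∨ pvAt maze (n - 1) (n - 1) = 0 then []
  else pvLoopB maze n (5 ^ (n.toNat * n.toNat)) [(0, 0, "", [(0, 0)])] []

-- ===== PRECONDITION & SPEC =====
def pvAt? (maze : List (List Int)) (i j : Int) : Option Int :=
  (PySem.List.pyGet? maze i).bind (fun r => PySem.List.pyGet? r j)

-- Pre_ admits every input where A's start/goal guard returns [] (including Python's negative-index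
-- wraparound for n ≤ 0) plus the natural domain where the DFS runs: first n rows each of length ≥ n.
-- It excludes inputs where A raises IndexError (ragged/too-small mazes, n ≤ 0 past the guard) and
-- the rare ragged mazes whose short rows are shielded by walls, on which A happens to return [].
def Pre_find_path_with_coordinates (maze : List (List Int)) (n : Int) : Prop :=
  maze = [] ∨
  pvAt? maze 0 0 = some 0 ∨
  ((pvAt? maze 0 0).isSome ∧ pvAt? maze (n - 1) (n - 1) = some 0) ∨
  ((pvAt? maze 0 0).isSome ∧ (pvAt? maze (n - 1) (n - 1)).isSome ∧
    1 ≤ n ∧ n ≤ (maze.length : Int) ∧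
    ∀ row ∈ maze.take n.toNat, n ≤ (row.length : Int))

instance (maze : List (List Int)) (n : Int) : Decidable (Pre_find_path_with_coordinates maze n) := by
  unfold Pre_find_path_with_coordinates; infer_instance

def pvWitness_find_path_with_coordinates : List (List Int) × Int := ([[1, 1], [1, 1]], 2)

def Spec_find_path_with_coordinates (maze : List (List Int)) (n : Int) (out : List (String × (List (Int × Int)))) : Prop := out = find_path_with_coordinates_alt maze n
instance (maze : List (List Int)) (n : Int) (out : List (String × (List (Int × Int)))) : Decidable (Spec_find_path_with_coordinates maze n out) := by unfold Spec_find_path_with_coordinates; infer_instance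

-- ===== CLAIM (what is proved, stated in full; the proofs are below) =====
def Claim_equal_find_path_with_coordinates : Prop := ∀ (maze : List (List Int)) (n : Int), Dom_find_path_with_coordinates maze n → Pre_find_path_with_coordinates maze n → Spec_find_path_with_coordinates maze n (find_path_with_coordinates maze n)

-- ===== LEMMAS AND PROOFS =====

-- pvDfsC: A's dfs with the visited matrix replaced by membership in coords (proof-side bridge)
def pvDfsC (maze : List (List Int)) (n : Int) (fuel : Nat) (x y : Int) (path : String)
    (coords : List (Int × Int)) : List (String × List (Int × Int)) :=
  match fuel with
  | 0 => []
  | fuel + 1 =>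
    if x = n - 1 ∧ y = n - 1 then [(path, coords)]
    else
      (if 0 ≤ x + 1 ∧ x + 1 < n ∧ 0 ≤ y ∧ y < n ∧ pvAt maze (x+1) y = 1 ∧ (x+1, y) ∉ coords then
        pvDfsC maze n fuel (x+1) y (path.push 'D') (coords ++ [(x+1, y)]) else []) ++
      (if 0 ≤ x ∧ x < n ∧ 0 ≤ y - 1 ∧ y - 1 < n ∧ pvAt maze x (y-1) = 1 ∧ (x, y-1) ∉ coords then
        pvDfsC maze n fuel x (y-1) (path.push 'L') (coords ++ [(x, y-1)]) else []) ++
      (if 0 ≤ x ∧ x < n ∧ 0 ≤ y + 1 ∧ y + 1 < n ∧ pvAt maze x (y+1) = 1 ∧ (x, y+1) ∉ coords then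
        pvDfsC maze n fuel x (y+1) (path.push 'R') (coords ++ [(x, y+1)]) else []) ++
      (if 0 ≤ x - 1 ∧ x - 1 < n ∧ 0 ≤ y ∧ y < n ∧ pvAt maze (x-1) y = 1 ∧ (x-1, y) ∉ coords then
        pvDfsC maze n fuel (x-1) y (path.push 'U') (coords ++ [(x-1, y)]) else [])

-- the visited matrix is an n × n Boolean table recording exactly membership in coords
def pvVisOK (n : Int) (coords : List (Int × Int)) (v : List (List Bool)) : Prop :=
  v.length = n.toNat ∧ (∀ r ∈ v, r.length = n.toNat) ∧
  ∀ a b : Int, 0 ≤ a → a < n → 0 ≤ b → b < n → pvGetV v a b = decide ((a, b) ∈ coords)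

theorem pvVisOK_nil (n : Int) :
    pvVisOK n [] (List.replicate n.toNat (List.replicate n.toNat false)) := by
  refine ⟨List.length_replicate, fun r hr => ?_, fun a b _ _ _ _ => ?_⟩
  · rw [List.eq_of_mem_replicate hr]; exact List.length_replicate
  · simp [pvGetV, List.getD_eq_getElem?_getD, List.getElem?_replicate]
    split <;> simp

theorem pvVisOK_set {n : Int} {coords : List (Int × Int)} {v : List (List Bool)}
    (h : pvVisOK n coords v) {a b : Int} (ha : 0 ≤ a) (ha' : a < n) (hb : 0 ≤ b) (hb' : b < n) :
    pvVisOK n (coords ++ [(a, b)]) (pvSetV v a b true) := by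
  obtain ⟨hlen, hrows, hget⟩ := h
  have han : a.toNat < v.length := by rw [hlen]; omega
  have hrowmem : v.getD a.toNat [] ∈ v := by
    rw [List.getD_eq_getElem?_getD, List.getElem?_eq_getElem han]
    exact List.getElem_mem han
  have hbn : b.toNat < (v.getD a.toNat []).length := by rw [hrows _ hrowmem]; omega
  refine ⟨?_, ?_, ?_⟩
  · simp [pvSetV, hlen]
  · intro r hr
    rcases List.mem_or_eq_of_mem_set hr with hr' | hr'
    · exact hrows r hr'
    · rw [hr', List.length_set]; exact hrows _ hrowmem
  · intro x y hx hx' hy hy'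
    have hgv := hget x y hx hx' hy hy'
    simp only [pvGetV, pvSetV, List.getD_eq_getElem?_getD] at hgv hbn ⊢
    by_cases hxa : x.toNat = a.toNat
    · have hxa' : x = a := by omega
      subst hxa'
      rw [hxa, List.getElem?_set_self han, Option.getD_some]
      by_cases hyb : y.toNat = b.toNat
      · have hyb' : y = b := by omega
        subst hyb'
        rw [hyb, List.getElem?_set_self hbn, Option.getD_some]
        simp
      · have hyb' : y ≠ b := by omega
        rw [List.getElem?_set_ne (fun h => hyb h.symm), ← hxa, hgv]
        simp [hyb']
    · have hxa' : x ≠ a := by omega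
      rw [List.getElem?_set_ne (fun h => hxa h.symm), hgv]
      simp [hxa']

theorem pvDfsA_eq_pvDfsC (maze : List (List Int)) (n : Int) :
    ∀ (fuel : Nat) (x y : Int) (path : String) (coords : List (Int × Int))
      (visited : List (List Bool)), pvVisOK n coords visited →
      pvDfsA maze n fuel x y path coords visited = pvDfsC maze n fuel x y path coords := by
  intro fuel
  induction fuel with
  | zero => intro x y path coords visited _; rfl
  | succ fuel ih =>
    intro x y path coords visited hvis
    by_cases hgoal : x = n - 1 ∧ y = n - 1
    · simp [pvDfsA, pvDfsC, hgoal]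
    · have branch : ∀ (c : Char) (nx ny : Int) (acc : List (String × List (Int × Int))),
        (if 0 ≤ nx ∧ nx < n ∧ 0 ≤ ny ∧ ny < n ∧ pvAt maze nx ny = 1 ∧ pvGetV visited nx ny = false then
          acc ++ pvDfsA maze n fuel nx ny (path.push c) (coords ++ [(nx, ny)])
            (pvSetV visited nx ny true)
        else acc)
        = acc ++ (if 0 ≤ nx ∧ nx < n ∧ 0 ≤ ny ∧ ny < n ∧ pvAt maze nx ny = 1 ∧ (nx, ny) ∉ coords then
          pvDfsC maze n fuel nx ny (path.push c) (coords ++ [(nx, ny)]) else []) := by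
        intro c nx ny acc
        by_cases hr : 0 ≤ nx ∧ nx < n ∧ 0 ≤ ny ∧ ny < n
        · have hv := hvis.2.2 nx ny hr.1 hr.2.1 hr.2.2.1 hr.2.2.2
          by_cases hm : (nx, ny) ∈ coords
          · have : pvGetV visited nx ny = true := by rw [hv]; simp [hm]
            simp [hr, hm, this]
          · have hvf : pvGetV visited nx ny = false := by rw [hv]; simp [hm]
            by_cases h1 : pvAt maze nx ny = 1
            · rw [if_pos ⟨hr.1, hr.2.1, hr.2.2.1, hr.2.2.2, h1, hvf⟩,
                if_pos ⟨hr.1, hr.2.1, hr.2.2.1, hr.2.2.2, h1, hm⟩,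
                ih nx ny (path.push c) (coords ++ [(nx, ny)]) (pvSetV visited nx ny true)
                  (pvVisOK_set hvis hr.1 hr.2.1 hr.2.2.1 hr.2.2.2)]
            · simp [hr, h1]
        · have hA : ¬ (0 ≤ nx ∧ nx < n ∧ 0 ≤ ny ∧ ny < n ∧ pvAt maze nx ny = 1 ∧
              pvGetV visited nx ny = false) := by tauto
          have hC : ¬ (0 ≤ nx ∧ nx < n ∧ 0 ≤ ny ∧ ny < n ∧ pvAt maze nx ny = 1 ∧
              (nx, ny) ∉ coords) := by tauto
          simp [hA, hC]
      show pvDfsA maze n (fuel + 1) x y path coords visited = _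
      simp only [pvDfsA, pvDfsC, if_neg hgoal, pvDirs, List.foldl]
      rw [branch, branch, branch, branch]
      simp [sub_eq_add_neg]

-- frame invariant: the path's coordinates are distinct cells of the n × n grid
def pvInv (n : Int) (f : Int × Int × String × List (Int × Int)) : Prop :=
  f.2.2.2.Nodup ∧ ∀ c ∈ f.2.2.2, 0 ≤ c.1 ∧ c.1 < n ∧ 0 ≤ c.2 ∧ c.2 < n

theorem pvInv_length_le {n : Int} {f : Int × Int × String × List (Int × Int)} (h : pvInv n f) :
    f.2.2.2.length ≤ n.toNat * n.toNat := by
  obtain ⟨hnd, hmem⟩ := h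
  have hsub : f.2.2.2.toFinset ⊆ (Finset.Icc (0 : Int) (n - 1)) ×ˢ (Finset.Icc (0 : Int) (n - 1)) := by
    intro c hc
    have := hmem c (List.mem_toFinset.mp hc)
    simp only [Finset.mem_product, Finset.mem_Icc]
    omega
  have hcard := Finset.card_le_card hsub
  rw [List.toFinset_card_of_nodup hnd] at hcard
  simpa [Int.card_Icc] using hcard

def pvW (n : Int) (f : Int × Int × String × List (Int × Int)) : Nat :=
  5 ^ (n.toNat * n.toNat + 1 - f.2.2.2.length)

theorem pvLoopB_eq (maze : List (List Int)) (n : Int) :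
    ∀ (fuel : Nat) (stack : List (Int × Int × String × List (Int × Int)))
      (result : List (String × List (Int × Int))),
      (∀ f ∈ stack, pvInv n f) → (stack.map (pvW n)).sum ≤ fuel →
      pvLoopB maze n fuel stack result
        = result ++ stack.flatMap (fun f =>
            pvDfsC maze n (n.toNat * n.toNat + 1 - f.2.2.2.length) f.1 f.2.1 f.2.2.1 f.2.2.2) := by
  intro fuel
  induction fuel with
  | zero =>
    intro stack result hinv hsum
    cases stack with
    | nil => simp [pvLoopB]
    | cons f rest =>
      exfalso
      have : 1 ≤ pvW n f := Nat.one_le_iff_ne_zero.mpr (by simp [pvW])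
      simp only [List.map_cons, List.sum_cons, Nat.le_zero] at hsum
      omega
  | succ fuel ih =>
    intro stack result hinv hsum
    cases stack with
    | nil => simp [pvLoopB]
    | cons f rest =>
      obtain ⟨x, y, path, coords⟩ := f
      have hfinv : pvInv n (x, y, path, coords) := hinv _ (List.mem_cons_self ..)
      have hL : coords.length ≤ n.toNat * n.toNat := pvInv_length_le hfinv
      set m : Nat := n.toNat * n.toNat - coords.length with hm
      have hk : n.toNat * n.toNat + 1 - coords.length = m + 1 := by omega
      have hw : pvW n (x, y, path, coords) = 5 ^ (m + 1) := by simp [pvW, hk]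
      simp only [List.map_cons, List.sum_cons, hw] at hsum
      by_cases hgoal : x = n - 1 ∧ y = n - 1
      · rw [show pvLoopB maze n (fuel + 1) ((x, y, path, coords) :: rest) result
              = pvLoopB maze n fuel rest (result ++ [(path, coords)]) from by
            simp only [pvLoopB]; rw [if_pos hgoal]]
        rw [ih rest (result ++ [(path, coords)]) (fun g hg => hinv g (List.mem_cons_of_mem _ hg))
          (by have : 1 ≤ 5 ^ (m + 1) := Nat.one_le_pow _ _ (by omega); omega)]
        simp only [List.flatMap_cons, hk, pvDfsC, if_pos hgoal]
        simp
      · rw [show pvLoopB maze n (fuel + 1) ((x, y, path, coords) :: rest) result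
              = pvLoopB maze n fuel ((pvCands x y).foldl (fun st d =>
                  let nx := d.2.1
                  let ny := d.2.2
                  if 0 ≤ nx ∧ nx < n ∧ 0 ≤ ny ∧ ny < n ∧ pvAt maze nx ny = 1 ∧ (nx, ny) ∉ coords then
                    (nx, ny, path.push d.1, coords ++ [(nx, ny)]) :: st
                  else st) rest) result from by
            simp only [pvLoopB]; rw [if_neg hgoal]]
        -- the foldl over the four candidates pushes the valid frames, top-first D,L,R,U
        have hstack : (pvCands x y).foldl (fun st d =>
            let nx := d.2.1
            let ny := d.2.2
            if 0 ≤ nx ∧ nx < n ∧ 0 ≤ ny ∧ ny < n ∧ pvAt maze nx ny = 1 ∧ (nx, ny) ∉ coords then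
              (nx, ny, path.push d.1, coords ++ [(nx, ny)]) :: st
            else st) rest
          = (if 0 ≤ x + 1 ∧ x + 1 < n ∧ 0 ≤ y ∧ y < n ∧ pvAt maze (x+1) y = 1 ∧ (x+1, y) ∉ coords then
               [((x+1 : Int), y, path.push 'D', coords ++ [(x+1, y)])] else []) ++
            (if 0 ≤ x ∧ x < n ∧ 0 ≤ y - 1 ∧ y - 1 < n ∧ pvAt maze x (y-1) = 1 ∧ (x, y-1) ∉ coords then
               [(x, y - 1, path.push 'L', coords ++ [(x, y-1)])] else []) ++
            (if 0 ≤ x ∧ x < n ∧ 0 ≤ y + 1 ∧ y + 1 < n ∧ pvAt maze x (y+1) = 1 ∧ (x, y+1) ∉ coords then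
               [(x, y + 1, path.push 'R', coords ++ [(x, y+1)])] else []) ++
            (if 0 ≤ x - 1 ∧ x - 1 < n ∧ 0 ≤ y ∧ y < n ∧ pvAt maze (x-1) y = 1 ∧ (x-1, y) ∉ coords then
               [((x-1 : Int), y, path.push 'U', coords ++ [(x-1, y)])] else []) ++ rest := by
          simp only [pvCands, List.foldl]
          split_ifs <;> simp
        rw [hstack]
        have hinv' : ∀ g ∈ (if 0 ≤ x + 1 ∧ x + 1 < n ∧ 0 ≤ y ∧ y < n ∧ pvAt maze (x+1) y = 1 ∧ (x+1, y) ∉ coords then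
               [((x+1 : Int), y, path.push 'D', coords ++ [(x+1, y)])] else []) ++
            (if 0 ≤ x ∧ x < n ∧ 0 ≤ y - 1 ∧ y - 1 < n ∧ pvAt maze x (y-1) = 1 ∧ (x, y-1) ∉ coords then
               [(x, y - 1, path.push 'L', coords ++ [(x, y-1)])] else []) ++
            (if 0 ≤ x ∧ x < n ∧ 0 ≤ y + 1 ∧ y + 1 < n ∧ pvAt maze x (y+1) = 1 ∧ (x, y+1) ∉ coords then
               [(x, y + 1, path.push 'R', coords ++ [(x, y+1)])] else []) ++
            (if 0 ≤ x - 1 ∧ x - 1 < n ∧ 0 ≤ y ∧ y < n ∧ pvAt maze (x-1) y = 1 ∧ (x-1, y) ∉ coords then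
               [((x-1 : Int), y, path.push 'U', coords ++ [(x-1, y)])] else []) ++ rest, pvInv n g := by
          intro g hg
          simp only [List.mem_append] at hg
          have hnew : ∀ (nx ny : Int) (c : Char), 0 ≤ nx → nx < n → 0 ≤ ny → ny < n →
              (nx, ny) ∉ coords → pvInv n (nx, ny, path.push c, coords ++ [(nx, ny)]) := by
            intro nx ny c h1 h2 h3 h4 h5
            refine ⟨?_, ?_⟩
            · simp only [List.nodup_append, List.nodup_singleton, true_and]
              exact ⟨hfinv.1, fun a ha b hb => by
                simp at hb; subst hb; exact fun h => h5 (h ▸ ha)⟩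
            · intro d hd
              rcases List.mem_append.mp hd with hd | hd
              · exact hfinv.2 d hd
              · simp at hd; subst hd; exact ⟨h1, h2, h3, h4⟩
          rcases hg with ((((hg | hg) | hg) | hg)) | hg <;>
            first
            | (exact hinv g (List.mem_cons_of_mem _ hg))
            | (revert hg; split_ifs with hc
               · intro hg; simp at hg; subst hg
                 exact hnew _ _ _ hc.1 hc.2.1 hc.2.2.1 hc.2.2.2.1 hc.2.2.2.2.2
               · intro hg; simp at hg)
        rw [ih _ result hinv' ?hsum]
        case hsum =>
          have hb : ∀ (P : Prop) (inst : Decidable P) (nx ny : Int) (c : Char),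
              ((if P then [(nx, ny, path.push c, coords ++ [(nx, ny)])] else []).map (pvW n)).sum
                ≤ 5 ^ m := by
            intro P inst nx ny c
            split_ifs
            · simp only [List.map_cons, List.map_nil, List.sum_cons, List.sum_nil, Nat.add_zero, pvW]
              exact Nat.pow_le_pow_right (by omega) (by simp; omega)
            · simp
          have hD := hb (0 ≤ x + 1 ∧ x + 1 < n ∧ 0 ≤ y ∧ y < n ∧ pvAt maze (x+1) y = 1 ∧ (x+1, y) ∉ coords) inferInstance (x+1) (y) 'D'
          have hL := hb (0 ≤ x ∧ x < n ∧ 0 ≤ y - 1 ∧ y - 1 < n ∧ pvAt maze x (y-1) = 1 ∧ (x, y-1) ∉ coords) inferInstance (x) (y-1) 'L'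
          have hR := hb (0 ≤ x ∧ x < n ∧ 0 ≤ y + 1 ∧ y + 1 < n ∧ pvAt maze x (y+1) = 1 ∧ (x, y+1) ∉ coords) inferInstance (x) (y+1) 'R'
          have hU := hb (0 ≤ x - 1 ∧ x - 1 < n ∧ 0 ≤ y ∧ y < n ∧ pvAt maze (x-1) y = 1 ∧ (x-1, y) ∉ coords) inferInstance (x-1) (y) 'U'
          have hpow : 4 * 5 ^ m + 1 ≤ 5 ^ (m + 1) := by
            have h5 : 1 ≤ 5 ^ m := Nat.one_le_pow _ _ (by omega)
            calc 4 * 5 ^ m + 1 ≤ 4 * 5 ^ m + 5 ^ m := by omega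
            _ = 5 ^ (m + 1) := by ring
          simp only [List.map_append, List.sum_append]
          omega
        -- both sides are result ++ the four branch results ++ the rest of the stack
        simp only [List.flatMap_append, List.flatMap_cons, hk, List.append_assoc]
        congr 1
        rw [show pvDfsC maze n (m + 1) x y path coords
            = _ from rfl]
        simp only [pvDfsC, if_neg hgoal]
        have hbr : ∀ (nx ny : Int) (c : Char),
            (if 0 ≤ nx ∧ nx < n ∧ 0 ≤ ny ∧ ny < n ∧ pvAt maze nx ny = 1 ∧ (nx, ny) ∉ coords then
               [(nx, ny, path.push c, coords ++ [(nx, ny)])] else []).flatMap (fun f =>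
                  pvDfsC maze n (n.toNat * n.toNat + 1 - f.2.2.2.length) f.1 f.2.1 f.2.2.1 f.2.2.2)
            = (if 0 ≤ nx ∧ nx < n ∧ 0 ≤ ny ∧ ny < n ∧ pvAt maze nx ny = 1 ∧ (nx, ny) ∉ coords then
               pvDfsC maze n m nx ny (path.push c) (coords ++ [(nx, ny)]) else []) := by
          intro nx ny c
          split_ifs with hc
          · simp only [List.flatMap_cons, List.flatMap_nil, List.append_nil,
              List.length_append, List.length_cons, List.length_nil]
            rw [show n.toNat * n.toNat + 1 - (coords.length + (0 + 1)) = m from by omega]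
          · simp
        simp only [hbr, List.append_assoc]

-- ===== VERDICT (by name: the statement is the Claim_ definition above) =====
theorem find_path_with_coordinates_spec : Claim_equal_find_path_with_coordinates := by
  intro maze n _ hpre
  unfold Spec_find_path_with_coordinates
  unfold find_path_with_coordinates find_path_with_coordinates_alt
  by_cases hg : maze = [] ∨ pvAt maze 0 0 = 0 ∨ pvAt maze (n - 1) (n - 1) = 0
  · simp [hg]
  · push_neg at hg
    obtain ⟨hne, h00, hnn⟩ := hg
    have hshape : 1 ≤ n ∧ n ≤ (maze.length : Int) ∧
        ∀ row ∈ maze.take n.toNat, n ≤ (row.length : Int) := by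
      rcases hpre with h | h | h | h
      · exact absurd h hne
      · exact absurd (by simp [pvAt, pvAt?] at h ⊢; rw [h]; rfl) h00
      · exact absurd (by simp only [pvAt, pvAt?] at h ⊢; rw [h.2]; rfl) hnn
      · exact h.2.2
    rw [if_neg (by push_neg; exact ⟨hne, h00, hnn⟩), if_neg (by push_neg; exact ⟨hne, h00, hnn⟩)]
    have hn1 : 1 ≤ n := hshape.1
    -- A side
    rw [pvDfsA_eq_pvDfsC maze n _ 0 0 "" [(0, 0)] _
      (by simpa using pvVisOK_set (pvVisOK_nil n) (le_refl 0) (by omega) (le_refl 0) (by omega))]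
    -- B side
    rw [pvLoopB_eq maze n (5 ^ (n.toNat * n.toNat)) [(0, 0, "", [(0, 0)])] []
      (by intro f hf; simp at hf; subst hf
          exact ⟨List.nodup_singleton _, by intro c hc; simp at hc; subst hc; constructor <;> omega⟩)
      (by simp [pvW])]
    simp
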